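-- pv_equiv track=rewrite | github.com/RavinderSinghPB/data-structure-and-algorithm | hash set, dic/Equal 0, 1 and 2.py | getSubstringWithEqual012
-- ===== SOURCE A (Python) =====
-- def getSubstringWithEqual012(string):
--     n = len(string)
--
--     # map to store, how many times a difference
--     # pair has occurred previously
--     mp = dict()
--     mp[(0, 0)] = 1
--
--     # zc (Count of zeroes), oc(Count of 1s)
--     # and tc(count of twos)
--     # In starting all counts are zero
--     zc, oc, tc = 0, 0, 0
--
--     # looping into string
--     res = 0  # Initialize result
--     for i in range(n):
--
--         # increasing the count of current character
--         if string[i] == '0':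
--             zc += 1
--         elif string[i] == '1':
--             oc += 1
--         else:
--             tc += 1  # Assuming that string doesn't contain
--             # other characters
--
--         # making pair of differences (z[i] - o[i],
--         # z[i] - t[i])
--         tmp = (zc - oc, zc - tc)
--
--         # Count of previous occurrences of above pair
--         # indicates that the subarrays forming from
--         # every previous occurrence to this occurrence
--         # is a subarray with equal number of 0's, 1's
--         # and 2's
--         if tmp not in mp:
--             res += 0
--         else:
--             res += mp[tmp]
--
--             # increasing the count of current difference
--         # pair by 1
--         if tmp in mp:
--             mp[tmp] += 1
--         else:
--             mp[tmp] = 1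
--
--     return res
-- ===== SOURCE B (Python) =====
-- def getSubstringWithEqual012(string):
--     # Two-pass closed form: materialize the prefix-difference keys, histogram
--     # them, and sum C(m, 2) over the multiplicities -- no online accumulation.
--     z = o = t = 0
--     keys = [(0, 0)]
--     for ch in string:
--         if ch == '0':
--             z += 1
--         elif ch == '1':
--             o += 1
--         else:
--             t += 1
--         keys.append((z - o, z - t))
--     cnt = {}
--     for k in keys:
--         cnt[k] = cnt.get(k, 0) + 1
--     return sum(m * (m - 1) // 2 for m in cnt.values())
-- ===== Notes on version B (the rewrite author's own statement) =====
-- stated objective: alternative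
-- what changed: B replaces A's online accumulation (seeded difference-pair dict whose previous count is added to the result at every step) by a two-pass closed form: materialize the list of prefix-difference keys, histogram it, and return the sum of m*(m-1)//2 over the multiplicities.
import Mathlib
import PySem

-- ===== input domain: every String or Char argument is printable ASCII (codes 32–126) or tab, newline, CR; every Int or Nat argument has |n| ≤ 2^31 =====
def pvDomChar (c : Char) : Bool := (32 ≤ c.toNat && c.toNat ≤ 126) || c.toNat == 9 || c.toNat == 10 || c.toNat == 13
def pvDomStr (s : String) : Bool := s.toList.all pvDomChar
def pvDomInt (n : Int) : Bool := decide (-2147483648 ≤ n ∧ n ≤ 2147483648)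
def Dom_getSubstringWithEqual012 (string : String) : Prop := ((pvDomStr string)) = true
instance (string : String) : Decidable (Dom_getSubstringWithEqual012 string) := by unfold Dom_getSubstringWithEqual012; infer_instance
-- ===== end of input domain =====

-- B replaces A's online difference-pair accumulation by a two-pass closed form (key list, histogram, sum of m*(m-1)//2); an alternative decomposition, not faster.


-- ===== PORT A =====
-- loop body of A's single pass; state = (mp, zc, oc, tc, res)
def pvLoopA (st : PySem.Dict (Int × Int) Int × Int × Int × Int × Int) (c : Char) :
    PySem.Dict (Int × Int) Int × Int × Int × Int × Int :=
  let mp := st.1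
  let zc := st.2.1
  let oc := st.2.2.1
  let tc := st.2.2.2.1
  let res := st.2.2.2.2
  let zot := if c = '0' then (zc + 1, oc, tc) else if c = '1' then (zc, oc + 1, tc) else (zc, oc, tc + 1)
  let zc := zot.1
  let oc := zot.2.1
  let tc := zot.2.2
  let tmp := (zc - oc, zc - tc)
  -- 'res += mp[tmp]' is guarded by 'tmp in mp', so getD is exact here
  let res := if mp.contains tmp = false then res + 0 else res + mp.getD tmp 0
  let mp := if mp.contains tmp then mp.insert tmp (mp.getD tmp 0 + 1) else mp.insert tmp 1
  (mp, zc, oc, tc, res)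

def getSubstringWithEqual012 (string : String) : Int :=
  ((string.toList.foldl pvLoopA ((PySem.Dict.empty).insert (0, 0) 1, 0, 0, 0, 0))).2.2.2.2

-- ===== PORT B =====
-- first pass of B: build the prefix-difference key list; state = (z, o, t, keys)
def pvLoopB (st : Int × Int × Int × List (Int × Int)) (c : Char) :
    Int × Int × Int × List (Int × Int) :=
  let z := st.1
  let o := st.2.1
  let t := st.2.2.1
  let keys := st.2.2.2
  let zot := if c = '0' then (z + 1, o, t) else if c = '1' then (z, o + 1, t) else (z, o, t + 1)
  let z := zot.1
  let o := zot.2.1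
  let t := zot.2.2
  (z, o, t, keys ++ [(z - o, z - t)])

-- 'sum(m * (m - 1) // 2 for m in cnt.values())'
def pvSumC : List Int → Int
  | [] => 0
  | m :: rest => PySem.Int.floordiv (m * (m - 1)) 2 + pvSumC rest

def getSubstringWithEqual012_alt (string : String) : Int :=
  let keys := (string.toList.foldl pvLoopB (0, 0, 0, [(0, 0)])).2.2.2
  -- 'cnt[k] = cnt.get(k, 0) + 1'
  let cnt := keys.foldl (fun d k => d.insert k (d.getD k 0 + 1)) PySem.Dict.empty
  pvSumC cnt.values

-- ===== PRECONDITION & SPEC =====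
def Spec_getSubstringWithEqual012 (string : String) (out : Int) : Prop := out = getSubstringWithEqual012_alt string
instance (string : String) (out : Int) : Decidable (Spec_getSubstringWithEqual012 string out) := by unfold Spec_getSubstringWithEqual012; infer_instance

-- ===== CLAIM (what is proved, stated in full; the proofs are below) =====
def Claim_equal_getSubstringWithEqual012 : Prop := ∀ (string : String), Dom_getSubstringWithEqual012 string → Spec_getSubstringWithEqual012 string (getSubstringWithEqual012 string)

-- ===== LEMMAS AND PROOFS =====

-- the sequence of prefix-difference keys produced from counts (z, o, t) by a char list
def pvKeys : Int → Int → Int → List Char → List (Int × Int)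
  | _, _, _, [] => []
  | z, o, t, c :: cs =>
    let zot := if c = '0' then (z + 1, o, t) else if c = '1' then (z, o + 1, t) else (z, o, t + 1)
    (zot.1 - zot.2.1, zot.1 - zot.2.2) :: pvKeys zot.1 zot.2.1 zot.2.2 cs

-- proof-side intermediate: each element counted in its strict suffix (= number of equal pairs)
def pvSuffixCount : List (Int × Int) → Int
  | [] => 0
  | k :: rest => (rest.count k : Int) + pvSuffixCount rest

theorem pvSuffixCount_append (l : List (Int × Int)) (a : Int × Int) :
    pvSuffixCount (l ++ [a]) = pvSuffixCount l + l.count a := by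
  induction l with
  | nil => simp [pvSuffixCount]
  | cons x l ih =>
    simp only [List.cons_append, pvSuffixCount, ih, List.count_append, List.count_cons,
      List.count_nil]
    have : (a == x) = (x == a) := by
      by_cases h : a = x
      · simp [h]
      · simp [h]
        exact fun h' => h h'.symm
    rw [this]
    push_cast
    ring

theorem pvSuffixCount_reverse (l : List (Int × Int)) :
    pvSuffixCount l.reverse = pvSuffixCount l := by
  induction l with
  | nil => rfl
  | cons a l ih =>
    rw [List.reverse_cons, pvSuffixCount_append, ih, List.count_reverse]
    simp [pvSuffixCount]; ring

theorem pvLoopB_keys (l : List Char) :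
    ∀ (z o t : Int) (keys : List (Int × Int)),
      (l.foldl pvLoopB (z, o, t, keys)).2.2.2 = keys ++ pvKeys z o t l := by
  induction l with
  | nil => intro z o t keys; simp [pvKeys]
  | cons c cs ih =>
    intro z o t keys
    simp only [List.foldl_cons, pvLoopB, pvKeys]
    rw [ih]
    simp

theorem pvLoopA_res (l : List Char) :
    ∀ (z o t res : Int) (mp : PySem.Dict (Int × Int) Int) (r : List (Int × Int)),
      (∀ k, mp.getD k 0 = (r.count k : Int)) →
      (∀ k, mp.contains k = decide (0 < r.count k)) →
      (l.foldl pvLoopA (mp, z, o, t, res)).2.2.2.2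
        = res - pvSuffixCount r + pvSuffixCount ((pvKeys z o t l).reverse ++ r) := by
  induction l with
  | nil => intro z o t res mp r _ _; simp [pvKeys]
  | cons c cs ih =>
    intro z o t res mp r hD hC
    simp only [List.foldl_cons, pvLoopA, pvKeys]
    set zot := if c = '0' then (z + 1, o, t) else if c = '1' then (z, o + 1, t) else (z, o, t + 1) with hzot
    set k1 : Int × Int := (zot.1 - zot.2.1, zot.1 - zot.2.2) with hk1
    have hcnt_self : (k1 :: r).count k1 = r.count k1 + 1 := by simp
    have hcnt_ne : ∀ k, k ≠ k1 → (k1 :: r).count k = r.count k := by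
      intro k hk
      have hb : (k1 == k) = false := beq_eq_false_iff_ne.mpr fun hx => hk hx.symm
      simp [List.count_cons, hb]
    have hD' : ∀ v : Int, v = (r.count k1 : Int) + 1 →
        ∀ k, (mp.insert k1 v).getD k 0 = (((k1 :: r).count k : Int)) := by
      intro v hv k
      rw [PySem.Dict.getD_insert]
      by_cases hk : k = k1
      · subst hk; rw [if_pos rfl, hv, hcnt_self]; push_cast; ring
      · rw [if_neg hk, hD k, hcnt_ne k hk]
    have hC' : ∀ v : Int, ∀ k, (mp.insert k1 v).contains k = decide (0 < (k1 :: r).count k) := by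
      intro v k
      rw [PySem.Dict.contains_insert, hC k]
      by_cases hk : k = k1
      · subst hk; simp [hcnt_self]
      · have hb : (k == k1) = false := beq_eq_false_iff_ne.mpr hk
        rw [hcnt_ne k hk, hb]
        simp
    have hrev : (k1 :: pvKeys zot.1 zot.2.1 zot.2.2 cs).reverse ++ r
        = (pvKeys zot.1 zot.2.1 zot.2.2 cs).reverse ++ (k1 :: r) := by simp
    by_cases h : mp.contains k1 = true
    · rw [if_neg (show ¬ (mp.contains k1 = false) by simp [h]), if_pos h]
      rw [ih zot.1 zot.2.1 zot.2.2 _ _ (k1 :: r) (hD' _ (by rw [hD k1])) (hC' _)]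
      rw [hrev, hD k1]
      simp only [pvSuffixCount]
      ring
    · have hf : mp.contains k1 = false := by simpa using h
      have hc0 : r.count k1 = 0 := by
        have hx := hC k1
        rw [hf] at hx
        by_contra hne
        have hp : 0 < r.count k1 := Nat.pos_of_ne_zero hne
        simp [hp] at hx
      rw [if_pos hf, if_neg h]
      rw [ih zot.1 zot.2.1 zot.2.2 _ _ (k1 :: r) (hD' _ (by rw [hc0]; simp)) (hC' _)]
      rw [hrev]
      simp only [pvSuffixCount]
      rw [hc0]
      push_cast
      ring


theorem pvC_succ (c : Nat) :
    PySem.Int.floordiv ((((c : Int) + 1)) * (((c : Int) + 1) - 1)) 2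
      = PySem.Int.floordiv ((c : Int) * ((c : Int) - 1)) 2 + c := by
  rw [PySem.Int.floordiv_eq_ediv_of_pos (by norm_num), PySem.Int.floordiv_eq_ediv_of_pos (by norm_num)]
  have h : ((c : Int) + 1) * (((c : Int) + 1) - 1) = (c : Int) * ((c : Int) - 1) + (c : Int) * 2 := by ring
  rw [h, Int.add_mul_ediv_right _ _ (by norm_num)]

theorem pvSuffixCount_eq_sum (l : List (Int × Int)) :
    pvSuffixCount l
      = ∑ k ∈ l.toFinset, PySem.Int.floordiv ((l.count k : Int) * ((l.count k : Int) - 1)) 2 := by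
  induction l with
  | nil => simp [pvSuffixCount]
  | cons a l ih =>
    simp only [pvSuffixCount, List.toFinset_cons, ih]
    by_cases h : a ∈ l.toFinset
    · rw [Finset.insert_eq_self.mpr h]
      have hsplit1 := (Finset.add_sum_erase l.toFinset
        (fun k => PySem.Int.floordiv (((a :: l).count k : Int) * (((a :: l).count k : Int) - 1)) 2) h).symm
      have hsplit2 := (Finset.add_sum_erase l.toFinset
        (fun k => PySem.Int.floordiv ((l.count k : Int) * ((l.count k : Int) - 1)) 2) h).symm
      have hcongr : ∑ k ∈ l.toFinset.erase a,
            PySem.Int.floordiv (((a :: l).count k : Int) * (((a :: l).count k : Int) - 1)) 2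
          = ∑ k ∈ l.toFinset.erase a,
            PySem.Int.floordiv ((l.count k : Int) * ((l.count k : Int) - 1)) 2 := by
        refine Finset.sum_congr rfl ?_
        intro k hk
        have hne : k ≠ a := (Finset.mem_erase.mp hk).1
        have hb : (a == k) = false := beq_eq_false_iff_ne.mpr fun hx => hne hx.symm
        rw [List.count_cons, hb]
        simp
      have hself : ((a :: l).count a : Int) = (l.count a : Int) + 1 := by
        simp
      rw [hsplit1, hsplit2, hcongr, hself, pvC_succ (l.count a)]
      ring
    · rw [Finset.sum_insert h]
      have hcnt0 : l.count a = 0 := by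
        rw [List.count_eq_zero]
        intro hmem
        exact h (List.mem_toFinset.mpr hmem)
      have hself : (a :: l).count a = 1 := by simp [hcnt0]
      have hcongr : ∑ k ∈ l.toFinset,
            PySem.Int.floordiv (((a :: l).count k : Int) * (((a :: l).count k : Int) - 1)) 2
          = ∑ k ∈ l.toFinset,
            PySem.Int.floordiv ((l.count k : Int) * ((l.count k : Int) - 1)) 2 := by
        refine Finset.sum_congr rfl ?_
        intro k hk
        have hne : k ≠ a := fun hx => h (hx ▸ hk)
        have hb : (a == k) = false := beq_eq_false_iff_ne.mpr fun hx => hne hx.symm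
        rw [List.count_cons, hb]
        simp
      rw [hself, hcongr, hcnt0]
      norm_num [PySem.Int.floordiv]

theorem pvSumC_eq_sum (ms : List Int) :
    pvSumC ms = (ms.map (fun m => PySem.Int.floordiv (m * (m - 1)) 2)).sum := by
  induction ms with
  | nil => rfl
  | cons m ms ih => simp [pvSumC, ih]

-- B's histogram-and-combine second phase equals pvSuffixCount of the key list
theorem pvAlt_eq_suffixCount (keys : List (Int × Int)) :
    pvSumC (keys.foldl (fun d k => d.insert k (d.getD k 0 + 1)) PySem.Dict.empty).values
      = pvSuffixCount keys := by
  rw [PySem.Dict.foldl_insert_getD_add_one_eq_counter]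
  have hvals : (PySem.Dict.counter keys).values
      = (PySem.Set.ofList keys).map (fun k => (keys.count k : Int)) := by
    show ((PySem.Dict.counter keys).items).map (·.2) = _
    rw [PySem.Dict.items_counter]
    simp
  rw [hvals, pvSumC_eq_sum, List.map_map]
  have hnd : (PySem.Set.ofList keys).Nodup := PySem.Set.nodup_ofList keys
  have hfin : (PySem.Set.ofList keys : List (Int × Int)).toFinset = keys.toFinset := by
    apply Finset.ext
    intro k
    simp [List.mem_toFinset, PySem.Set.mem_ofList]
  rw [pvSuffixCount_eq_sum, ← hfin, ← List.sum_toFinset _ hnd]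
  simp [Function.comp]

-- ===== VERDICT (by name: the statement is the Claim_ definition above) =====
theorem getSubstringWithEqual012_spec : Claim_equal_getSubstringWithEqual012 := by
  intro s _
  unfold Spec_getSubstringWithEqual012 getSubstringWithEqual012 getSubstringWithEqual012_alt
  rw [pvLoopB_keys, pvAlt_eq_suffixCount]
  have hD0 : ∀ k : Int × Int, ((PySem.Dict.empty).insert ((0 : Int), (0 : Int)) 1).getD k 0
      = (([((0 : Int), (0 : Int))].count k : Int)) := by
    intro k
    rw [PySem.Dict.getD_insert]
    by_cases h : k = (0, 0)
    · subst h; simp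
    · have hb : (((0 : Int), (0 : Int)) == k) = false := beq_eq_false_iff_ne.mpr fun hx => h hx.symm
      rw [if_neg h, PySem.Dict.getD_empty]
      simp [List.count_cons, hb]
  have hC0 : ∀ k : Int × Int, ((PySem.Dict.empty).insert ((0 : Int), (0 : Int)) 1).contains k
      = decide (0 < ([((0 : Int), (0 : Int))].count k)) := by
    intro k
    rw [PySem.Dict.contains_insert]
    by_cases h : k = (0, 0)
    · subst h; simp
    · have hb : (k == ((0 : Int), (0 : Int))) = false := beq_eq_false_iff_ne.mpr h
      have hb' : (((0 : Int), (0 : Int)) == k) = false := beq_eq_false_iff_ne.mpr fun hx => h hx.symm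
      simp [hb, List.count_cons, hb', PySem.Dict.contains_empty]
  rw [pvLoopA_res s.toList 0 0 0 0 _ [(0, 0)] hD0 hC0]
  have h1 : (pvKeys 0 0 0 s.toList).reverse ++ [((0 : Int), (0 : Int))]
      = ((0, 0) :: pvKeys 0 0 0 s.toList).reverse := by simp
  rw [h1, pvSuffixCount_reverse]
  simp [pvSuffixCount]
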